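-- pv_equiv track=rewrite | github.com/microsoft/presidio | presidio-analyzer/presidio_analyzer/predefined_recognizers/country_specific/germany/de_tax_id_recognizer.py | _validate_digit_distribution
-- ===== SOURCE A (Python) =====
-- def _validate_digit_distribution(digits: str) -> bool:
--     """
--     Validate that the first 10 digits follow the required distribution.
--
--     Rules:
--     - One digit must appear exactly 2 or 3 times
--     - At least one digit (0-9) must not appear at all
--     """
--     from collections import Counter
--
--     digit_counts = Counter(digits)
--
--     # Check that at least one digit doesn't appear
--     if len(digit_counts) == 10:
--         return False
--
--     # Check that one digit appears 2 or 3 times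
--     count_values = list(digit_counts.values())
--     has_double_or_triple = any(c in (2, 3) for c in count_values)
--
--     return has_double_or_triple
-- ===== SOURCE B (Python) =====
-- def _validate_digit_distribution(digits: str) -> bool:
--     s = sorted(digits)
--     sizes = []
--     i = 0
--     while i < len(s):
--         j = i
--         while j < len(s) and s[j] == s[i]:
--             j += 1
--         sizes.append(j - i)
--         i = j
--     if len(sizes) == 10:
--         return False
--     return any(n in (2, 3) for n in sizes)
-- ===== Notes on version B (the rewrite author's own statement) =====
-- stated objective: alternative
-- what changed: B replaces A's Counter hash table by sorting the characters and scanning consecutive runs, counting the number of runs and checking run lengths for 2 or 3; no dict is built.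
import Mathlib
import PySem

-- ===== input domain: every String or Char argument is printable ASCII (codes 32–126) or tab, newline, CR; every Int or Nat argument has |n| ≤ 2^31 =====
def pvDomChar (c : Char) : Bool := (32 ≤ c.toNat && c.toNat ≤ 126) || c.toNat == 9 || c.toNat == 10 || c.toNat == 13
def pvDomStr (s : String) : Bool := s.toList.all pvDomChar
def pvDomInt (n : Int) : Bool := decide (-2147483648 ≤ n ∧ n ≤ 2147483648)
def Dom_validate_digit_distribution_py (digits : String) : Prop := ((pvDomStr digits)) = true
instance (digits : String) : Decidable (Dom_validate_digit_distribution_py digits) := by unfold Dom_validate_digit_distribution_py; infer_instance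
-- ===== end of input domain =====

-- B replaces A's Counter table by sorting the characters and scanning consecutive runs; objective: alternative (no dict, sort-then-scan).

-- ===== PORT A =====
def validate_digit_distribution_py (digits : String) : Bool :=
  let digit_counts := PySem.Dict.counter digits.toList
  if PySem.Dict.size digit_counts == 10 then false
  else
    let count_values := PySem.Dict.values digit_counts
    count_values.any (fun c => c == 2 || c == 3)

-- ===== PORT B =====
-- run lengths of consecutive equal characters (Source B's inner while-scan)
def pvRuns : List Char → List (Char × Nat)
  | [] => []
  | c :: t =>
    (c, (t.takeWhile (· == c)).length + 1) :: pvRuns (t.dropWhile (· == c))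
termination_by l => l.length
decreasing_by
  simp only [List.length_cons]
  exact Nat.lt_succ_of_le (List.length_dropWhile_le _ _)

def validate_digit_distribution_py_alt (digits : String) : Bool :=
  let sizes := (pvRuns (PySem.List.sorted digits.toList (fun c => c) false)).map Prod.snd
  if sizes.length == 10 then false
  else sizes.any (fun n => n == 2 || n == 3)

-- ===== PRECONDITION & SPEC =====
def Spec_validate_digit_distribution_py (digits : String) (out : Bool) : Prop := out = validate_digit_distribution_py_alt digits
instance (digits : String) (out : Bool) : Decidable (Spec_validate_digit_distribution_py digits out) := by unfold Spec_validate_digit_distribution_py; infer_instance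

-- ===== CLAIM (what is proved, stated in full; the proofs are below) =====
def Claim_equal_validate_digit_distribution_py : Prop := ∀ (digits : String), Dom_validate_digit_distribution_py digits → Spec_validate_digit_distribution_py digits (validate_digit_distribution_py digits)

-- ===== LEMMAS AND PROOFS =====

-- On a ≤-sorted list, the runs have pairwise-distinct, exactly the occurring characters
-- as their heads, and each run's length is that character's count in the list.
theorem pvRuns_spec (l : List Char) (h : l.Pairwise (· ≤ ·)) :
    ((pvRuns l).map Prod.fst).Nodup ∧
    (∀ c : Char, c ∈ (pvRuns l).map Prod.fst ↔ c ∈ l) ∧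
    (∀ p ∈ pvRuns l, p.2 = l.count p.1) := by
  induction l using pvRuns.induct with
  | case1 => simp [pvRuns]
  | case2 c t ih =>
    have htp : t.Pairwise (· ≤ ·) := h.of_cons
    have hcle : ∀ x ∈ t, c ≤ x := fun x hx => List.rel_of_pairwise_cons h hx
    have hsplit : t.takeWhile (· == c) ++ t.dropWhile (· == c) = t :=
      List.takeWhile_append_dropWhile
    have hpre : ∀ x ∈ t.takeWhile (· == c), x = c := by
      intro x hx
      have := List.mem_takeWhile_imp hx
      simpa using this
    have hrest_sorted : (t.dropWhile (· == c)).Pairwise (· ≤ ·) :=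
      htp.sublist (List.dropWhile_sublist _)
    have hrest_sub : ∀ x ∈ t.dropWhile (· == c), x ∈ t := fun x hx =>
      (List.dropWhile_sublist _).mem hx
    have hcnot : c ∉ t.dropWhile (· == c) := by
      cases hr : t.dropWhile (· == c) with
      | nil => simp
      | cons r rr =>
        have hrne : (r == c) = false := by
          have := List.head?_dropWhile_not (· == c) t
          rw [hr] at this
          simpa using this
        have hrne' : r ≠ c := by simpa using hrne
        have hcr : c < r := lt_of_le_of_ne
          (hcle r (hrest_sub r (by rw [hr]; simp))) (Ne.symm hrne')
        intro hc
        rw [List.mem_cons] at hc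
        rcases hc with hc | hc
        · exact hrne' hc.symm
        · have : r ≤ c := List.rel_of_pairwise_cons (hr ▸ hrest_sorted) hc
          exact absurd (lt_of_lt_of_le hcr this) (lt_irrefl c)
    obtain ⟨ihnd, ihmem, ihcnt⟩ := ih hrest_sorted
    have hcnt_pre : (t.takeWhile (· == c)).count c = (t.takeWhile (· == c)).length := by
      rw [List.count_eq_length]
      intro b hb; exact (hpre b hb).symm
    have hcnt_rest0 : (t.dropWhile (· == c)).count c = 0 := by
      rw [List.count_eq_zero]; exact hcnot
    refine ⟨?_, ?_, ?_⟩
    · simp only [pvRuns, List.map_cons, List.nodup_cons]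
      refine ⟨?_, ihnd⟩
      intro hc
      exact hcnot ((ihmem c).mp hc)
    · intro c'
      simp only [pvRuns, List.map_cons, List.mem_cons, ihmem]
      constructor
      · rintro (rfl | hc')
        · exact .inl rfl
        · exact .inr (hrest_sub _ hc')
      · rintro (rfl | hc')
        · exact .inl rfl
        · rw [← hsplit] at hc'
          rcases List.mem_append.mp hc' with hp | hp
          · exact .inl (hpre _ hp)
          · exact .inr hp
    · intro p hp
      simp only [pvRuns, List.mem_cons] at hp
      rcases hp with rfl | hp
      · show (t.takeWhile (· == c)).length + 1 = (c :: t).count c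
        rw [List.count_cons_self]
        conv_rhs => rw [← hsplit]
        rw [List.count_append, hcnt_pre, hcnt_rest0]
      · have hmem : p.1 ∈ t.dropWhile (· == c) :=
          (ihmem p.1).mp (List.mem_map.mpr ⟨p, hp, rfl⟩)
        have hne : p.1 ≠ c := fun he => hcnot (he ▸ hmem)
        have hcpre : (t.takeWhile (· == c)).count p.1 = 0 := by
          rw [List.count_eq_zero]
          intro hx; exact hne (hpre _ hx)
        rw [ihcnt p hp]
        conv_rhs => rw [← hsplit]
        rw [List.count_cons, List.count_append, hcpre]
        simp [Ne.symm hne]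

-- ===== VERDICT (by name: the statement is the Claim_ definition above) =====
theorem validate_digit_distribution_py_spec : Claim_equal_validate_digit_distribution_py := by
  intro digits _
  unfold Spec_validate_digit_distribution_py
  unfold validate_digit_distribution_py validate_digit_distribution_py_alt
  set l := digits.toList with hl
  set s := PySem.List.sorted l (fun c => c) false with hs
  have hsp : s.Pairwise (· ≤ ·) := PySem.List.sorted_pairwise l (fun c => c)
  have hperm : s.Perm l := PySem.List.sorted_perm l (fun c => c) false
  obtain ⟨hnd, hmem, hcnt⟩ := pvRuns_spec s hsp
  -- A's Counter items
  have hitems : (PySem.Dict.counter l).items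
      = (PySem.Set.ofList l).map (fun k => (k, (l.count k : Int))) :=
    PySem.Dict.items_counter l
  -- sizes
  have hsize : PySem.Dict.size (PySem.Dict.counter l) = (PySem.Set.ofList l).length := by
    simp [PySem.Dict.size, hitems]
  have hlperm : ((pvRuns s).map Prod.fst).Perm (PySem.Set.ofList l) := by
    rw [List.perm_ext_iff_of_nodup hnd (PySem.Set.nodup_ofList l)]
    intro a
    rw [hmem a, PySem.Set.mem_ofList]
    exact hperm.mem_iff
  have hlen : ((pvRuns s).map Prod.snd).length = (PySem.Set.ofList l).length := by
    rw [List.length_map, ← hlperm.length_eq, List.length_map]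
  -- values side
  have hvals : PySem.Dict.values (PySem.Dict.counter l)
      = (PySem.Set.ofList l).map (fun k => (l.count k : Int)) := by
    simp [PySem.Dict.values, hitems, Function.comp]
  have hany : ((pvRuns s).map Prod.snd).any (fun n => n == 2 || n == 3)
      = (PySem.Set.ofList l).any (fun k => l.count k == 2 || l.count k == 3) := by
    rw [Bool.eq_iff_iff]
    simp only [List.any_eq_true, List.mem_map]
    constructor
    · rintro ⟨n, ⟨p, hp, rfl⟩, hn⟩
      refine ⟨p.1, ?_, ?_⟩
      · have : p.1 ∈ (pvRuns s).map Prod.fst := List.mem_map.mpr ⟨p, hp, rfl⟩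
        exact hlperm.mem_iff.mp this
      · rw [← hperm.count_eq, ← hcnt p hp]; exact hn
    · rintro ⟨k, hk, hn⟩
      have hk' : k ∈ (pvRuns s).map Prod.fst := hlperm.mem_iff.mpr hk
      obtain ⟨p, hp, rfl⟩ := List.mem_map.mp hk'
      refine ⟨p.2, ⟨p, hp, rfl⟩, ?_⟩
      rw [hcnt p hp, hperm.count_eq]; exact hn
  simp only [hsize, hvals, hlen, hany]
  split
  · rfl
  · rw [Bool.eq_iff_iff]
    simp only [List.any_eq_true, List.mem_map]
    constructor
    · rintro ⟨x, ⟨k, hk, rfl⟩, hx⟩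
      refine ⟨k, hk, ?_⟩
      simp only [beq_iff_eq, Bool.or_eq_true] at hx ⊢
      omega
    · rintro ⟨k, hk, hx⟩
      refine ⟨(l.count k : Int), ⟨k, hk, rfl⟩, ?_⟩
      simp only [beq_iff_eq, Bool.or_eq_true] at hx ⊢
      omega
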